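-- pv_equiv track=rewrite | github.com/jso122-2/DAWN_pub_real | mood/blend.py | blend_moods
-- ===== SOURCE A (Python) =====
-- from collections import Counter
--
-- MOOD_HIERARCHY = [
--     "joyful", "focused", "reflective", "anxious", "sad"
-- ]
--
-- def blend_moods(source_blooms):
--     moods = [bloom.get("mood", "undefined") for bloom in source_blooms]
--     mood_counts = Counter(moods)
--
--     if not mood_counts:
--         return "undefined"
--
--     # Find highest priority mood by presence in source set
--     for mood in MOOD_HIERARCHY:
--         if mood in mood_counts:
--             return mood
--
--     return moods[0]  # fallback
-- ===== SOURCE B (Python) =====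
-- MOOD_HIERARCHY = [
--     "joyful", "focused", "reflective", "anxious", "sad"
-- ]
--
-- def blend_moods(source_blooms):
--     moods = [bloom.get("mood", "undefined") for bloom in source_blooms]
--     if not moods:
--         return "undefined"
--     rank = {mood: i for i, mood in enumerate(MOOD_HIERARCHY)}
--     return min(moods, key=lambda m: rank.get(m, len(MOOD_HIERARCHY)))
-- ===== Notes on version B (the rewrite author's own statement) =====
-- stated objective: simpler
-- what changed: Replaced A's Counter build plus a membership scan over MOOD_HIERARCHY by a single argmin pass over the moods keyed by hierarchy rank (unknown moods rank last, so min's leftmost-tie rule reproduces A's moods[0] fallback).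
import Mathlib
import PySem

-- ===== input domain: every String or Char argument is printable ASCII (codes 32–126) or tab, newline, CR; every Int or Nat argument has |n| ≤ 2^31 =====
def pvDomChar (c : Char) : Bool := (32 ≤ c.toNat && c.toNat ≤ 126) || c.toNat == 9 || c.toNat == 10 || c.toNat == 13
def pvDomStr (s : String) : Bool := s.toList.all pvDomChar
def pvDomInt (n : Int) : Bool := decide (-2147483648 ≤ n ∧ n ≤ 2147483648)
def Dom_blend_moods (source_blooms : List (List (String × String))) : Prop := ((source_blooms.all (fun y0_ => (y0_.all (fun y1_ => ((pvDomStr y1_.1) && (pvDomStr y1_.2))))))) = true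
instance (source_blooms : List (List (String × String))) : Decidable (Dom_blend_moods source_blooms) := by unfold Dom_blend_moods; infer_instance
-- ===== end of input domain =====

-- B replaces A's hierarchy scan over a Counter by a single argmin pass over the moods, keyed by
-- hierarchy rank (unknown moods rank last, so min's leftmost-tie rule yields A's moods[0] fallback); objective: simpler.

-- MOOD_HIERARCHY (module constant, shared by A and B)
def pvHier : List String := ["joyful", "focused", "reflective", "anxious", "sad"]

-- ===== PORT A =====
-- the 'for mood in MOOD_HIERARCHY: if mood in mood_counts: return mood' loop
def pvFindMood : List String → PySem.Dict String Int → Option String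
  | [], _ => none
  | m :: rest, counts => if counts.contains m then some m else pvFindMood rest counts

def blend_moods (source_blooms : List (List (String × String))) : String :=
  let moods := source_blooms.map (fun bloom => (PySem.Dict.mk bloom).getD "mood" "undefined")
  let mood_counts := PySem.Dict.counter moods
  if mood_counts.size = 0 then "undefined"
  else
    match pvFindMood pvHier mood_counts with
    | some m => m
    | none => moods.headD "undefined"  -- moods[0]; moods is nonempty here, so headD's default is unreachable

-- ===== PORT B =====
def blend_moods_alt (source_blooms : List (List (String × String))) : String :=
  let moods := source_blooms.map (fun bloom => (PySem.Dict.mk bloom).getD "mood" "undefined")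
  if moods.isEmpty then "undefined"
  else
    let rank : PySem.Dict String Int :=
      PySem.Dict.ofList ((PySem.List.enumerate pvHier).map (fun p => (p.2, p.1)))
    match PySem.List.min? moods (fun m => rank.getD m (pvHier.length : Int)) with
    | some m => m
    | none => "undefined"  -- unreachable: min is only taken when moods is nonempty

-- ===== PRECONDITION & SPEC =====
def Spec_blend_moods (source_blooms : List (List (String × String))) (out : String) : Prop := out = blend_moods_alt source_blooms
instance (source_blooms : List (List (String × String))) (out : String) : Decidable (Spec_blend_moods source_blooms out) := by unfold Spec_blend_moods; infer_instance

-- ===== CLAIM (what is proved, stated in full; the proofs are below) =====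
def Claim_equal_blend_moods : Prop := ∀ (source_blooms : List (List (String × String))), Dom_blend_moods source_blooms → Spec_blend_moods source_blooms (blend_moods source_blooms)

-- ===== LEMMAS AND PROOFS =====

-- B's rank key, as a closed chain of ifs
def pvKey (m : String) : Int :=
  if m = "joyful" then 0 else if m = "focused" then 1 else if m = "reflective" then 2
  else if m = "anxious" then 3 else if m = "sad" then 4 else 5

lemma pvRank_eval :
    PySem.Dict.ofList ((PySem.List.enumerate pvHier).map (fun p => (p.2, p.1)))
      = PySem.Dict.mk [("joyful", 0), ("focused", 1), ("reflective", 2), ("anxious", 3), ("sad", 4)] := by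
  decide

lemma pvKey_eval (m : String) :
    (PySem.Dict.mk [(("joyful" : String), (0 : Int)), ("focused", 1), ("reflective", 2), ("anxious", 3), ("sad", 4)]).getD m (pvHier.length : Int) = pvKey m := by
  simp only [PySem.Dict.getD_eq_get?_getD, PySem.Dict.get?_mk_cons, beq_iff_eq,
    @eq_comm String _ m, pvKey, pvHier]
  split_ifs <;> rfl

lemma pvKey_nonneg (m : String) : 0 ≤ pvKey m := by
  unfold pvKey; split_ifs <;> norm_num

lemma pvKey_ge_five {m : String} (h0 : m ≠ "joyful") (h1 : m ≠ "focused") (h2 : m ≠ "reflective")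
    (h3 : m ≠ "anxious") (h4 : m ≠ "sad") : pvKey m = 5 := by
  simp [pvKey, h0, h1, h2, h3, h4]

-- fold of min? stays put when nothing beats the accumulator
lemma pvFoldl_min_stay {α : Type} (key : α → Int) (t : List α) (m : α)
    (h : ∀ y ∈ t, ¬ key y < key m) :
    t.foldl (fun acc x => match acc with
      | none => some x
      | some m' => if key x < key m' then some x else some m') (some m) = some m := by
  induction t with
  | nil => rfl
  | cons y t ih =>
    simp only [List.foldl_cons]
    rw [if_neg (h y (by simp))]
    exact ih (fun z hz => h z (by simp [hz]))

lemma pvMin?_const {α : Type} (key : α → Int) (x : α) (t : List α)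
    (h : ∀ y ∈ x :: t, key y = 5) :
    PySem.List.min? (x :: t) key = some x := by
  show List.foldl _ none (x :: t) = some x
  simp only [List.foldl_cons]
  exact pvFoldl_min_stay key t x (fun y hy => by
    rw [h y (by simp [hy]), h x (by simp)]; omega)

-- the core: for any list of moods, A's counter/hierarchy scan = B's argmin pass
lemma pvCore (moods : List String) :
    (if (PySem.Dict.counter moods).size = 0 then "undefined"
     else match pvFindMood pvHier (PySem.Dict.counter moods) with
       | some m => m
       | none => moods.headD "undefined")
    =
    (if moods.isEmpty then "undefined"
     else match PySem.List.min? moods pvKey with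
       | some m => m
       | none => "undefined") := by
  match moods with
  | [] => rfl
  | x :: t =>
    have hne : (x : String) :: t ≠ [] := by simp
    -- counter of a nonempty list is nonempty
    have hcs : (PySem.Dict.counter (x :: t)).size ≠ 0 := by
      have hk : (PySem.Dict.counter (x :: t)).keys = PySem.Set.ofList (x :: t) :=
        PySem.Dict.keys_counter _
      have hx : x ∈ (PySem.Dict.counter (x :: t)).keys := by
        rw [hk]; exact (PySem.Set.mem_ofList _ _).mpr (by simp)
      intro h0
      have : (PySem.Dict.counter (x :: t)).keys.length = 0 := by
        simpa [PySem.Dict.keys, PySem.Dict.size] using h0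
      rcases List.eq_nil_of_length_eq_zero this with h
      simp [h] at hx
    rw [if_neg hcs, if_neg (by simp)]
    -- min? returns some m on a nonempty list
    obtain ⟨m, hm⟩ : ∃ m, PySem.List.min? (x :: t) pvKey = some m := by
      cases h : PySem.List.min? (x :: t) pvKey with
      | none => exact absurd ((PySem.List.min?_eq_none_iff _ _).mp h) hne
      | some m => exact ⟨m, rfl⟩
    have hmem : m ∈ x :: t := PySem.List.min?_mem hm
    have hmin : ∀ y ∈ x :: t, pvKey m ≤ pvKey y := PySem.List.min?_isMin hm
    have hcont : ∀ c : String, (PySem.Dict.counter (x :: t)).contains c = (x :: t).contains c :=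
      fun c => PySem.Dict.contains_counter _ c
    rw [hm]
    simp only [pvFindMood, pvHier, hcont]
    by_cases h0 : "joyful" ∈ x :: t
    · rw [if_pos (by simpa using h0)]
      have h5 : pvKey m ≤ 0 := by simpa [pvKey] using hmin _ h0
      by_cases e : m = "joyful"
      · simp [e]
      · exfalso
        have : pvKey m ≠ 0 := by
          unfold pvKey; split_ifs <;> simp_all
        have := pvKey_nonneg m; omega
    · rw [if_neg (by simpa using h0)]
      by_cases h1 : "focused" ∈ x :: t
      · rw [if_pos (by simpa using h1)]
        have h5 : pvKey m ≤ 1 := by simpa [pvKey] using hmin _ h1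
        by_cases e : m = "focused"
        · simp [e]
        · exfalso
          have hj : m ≠ "joyful" := fun hh => h0 (hh ▸ hmem)
          have : pvKey m ≥ 2 := by
            unfold pvKey; split_ifs <;> simp_all
          omega
      · rw [if_neg (by simpa using h1)]
        by_cases h2 : "reflective" ∈ x :: t
        · rw [if_pos (by simpa using h2)]
          have h5 : pvKey m ≤ 2 := by simpa [pvKey] using hmin _ h2
          by_cases e : m = "reflective"
          · simp [e]
          · exfalso
            have hj : m ≠ "joyful" := fun hh => h0 (hh ▸ hmem)
            have hf : m ≠ "focused" := fun hh => h1 (hh ▸ hmem)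
            have : pvKey m ≥ 3 := by
              unfold pvKey; split_ifs <;> simp_all
            omega
        · rw [if_neg (by simpa using h2)]
          by_cases h3 : "anxious" ∈ x :: t
          · rw [if_pos (by simpa using h3)]
            have h5 : pvKey m ≤ 3 := by simpa [pvKey] using hmin _ h3
            by_cases e : m = "anxious"
            · simp [e]
            · exfalso
              have hj : m ≠ "joyful" := fun hh => h0 (hh ▸ hmem)
              have hf : m ≠ "focused" := fun hh => h1 (hh ▸ hmem)
              have hr : m ≠ "reflective" := fun hh => h2 (hh ▸ hmem)
              have : pvKey m ≥ 4 := by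
                unfold pvKey; split_ifs <;> simp_all
              omega
          · rw [if_neg (by simpa using h3)]
            by_cases h4 : "sad" ∈ x :: t
            · rw [if_pos (by simpa using h4)]
              have h5 : pvKey m ≤ 4 := by simpa [pvKey] using hmin _ h4
              by_cases e : m = "sad"
              · simp [e]
              · exfalso
                have hj : m ≠ "joyful" := fun hh => h0 (hh ▸ hmem)
                have hf : m ≠ "focused" := fun hh => h1 (hh ▸ hmem)
                have hr : m ≠ "reflective" := fun hh => h2 (hh ▸ hmem)
                have ha : m ≠ "anxious" := fun hh => h3 (hh ▸ hmem)
                have : pvKey m = 5 := pvKey_ge_five hj hf hr ha e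
                omega
            · rw [if_neg (by simpa using h4)]
              -- no hierarchy mood present: every key is 5, min? keeps the head
              have hall : ∀ y ∈ x :: t, pvKey y = 5 := by
                intro y hy
                exact pvKey_ge_five (fun hh => h0 (hh ▸ hy)) (fun hh => h1 (hh ▸ hy))
                  (fun hh => h2 (hh ▸ hy)) (fun hh => h3 (hh ▸ hy)) (fun hh => h4 (hh ▸ hy))
              have := pvMin?_const pvKey x t hall
              rw [this] at hm
              simp at hm
              simp [hm]

-- ===== VERDICT (by name: the statement is the Claim_ definition above) =====
theorem blend_moods_spec : Claim_equal_blend_moods := by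
  intro sb _
  show blend_moods sb = blend_moods_alt sb
  unfold blend_moods blend_moods_alt
  rw [pvRank_eval]
  simp only [pvKey_eval]
  exact pvCore _
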